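-- pv_equiv track=rewrite | github.com/ilson-onuki/Alertas_Dude | converte_html_csv.py | categorize_device
-- ===== SOURCE A (Python) =====
-- def categorize_device(device):
--     if device.startswith("PTP"):
--         return "PTP"
--     elif device.startswith("NET"):
--         return "Setor"
--     elif device.startswith("APM"):
--         return "Escolas"
--     elif device.startswith("L2"):
--         return "Linktel"
--     elif any(device.startswith(prefix) for prefix in ["MONITOR", "SWITCH", "VM"]):
--         return "Estrutura"
--     elif device.startswith("SKYNET"):
--         return "BB"
--     else:
--         return "Clientes PF"
-- ===== SOURCE B (Python) =====
-- # B: one hash table of exact category names keyed by the full prefixes; classify by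
-- # exact-match dict lookups of the four possible prefix lengths (7, 6, 3, 2) chained
-- # with `or` -- no startswith, no ordered scan over prefixes. Correct because no key
-- # is a prefix of another key, so at most one lookup can name a real prefix of device.
-- _EXACT = {
--     "MONITOR": "Estrutura",
--     "SWITCH": "Estrutura",
--     "SKYNET": "BB",
--     "PTP": "PTP",
--     "NET": "Setor",
--     "APM": "Escolas",
--     "L2": "Linktel",
--     "VM": "Estrutura",
-- }
--
-- def categorize_device(device):
--     return (_EXACT.get(device[:7]) or _EXACT.get(device[:6])
--             or _EXACT.get(device[:3]) or _EXACT.get(device[:2])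
--             or "Clientes PF")
-- ===== Notes on version B (the rewrite author's own statement) =====
-- stated objective: alternative
-- what changed: Replaces the ordered if/elif startswith chain by a single hash table keyed by the full prefixes, consulted with exact-match lookups of the four possible prefix lengths (device[:7], [:6], [:3], [:2]) chained with `or`; correct because no table key is a prefix of another.
import Mathlib
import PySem

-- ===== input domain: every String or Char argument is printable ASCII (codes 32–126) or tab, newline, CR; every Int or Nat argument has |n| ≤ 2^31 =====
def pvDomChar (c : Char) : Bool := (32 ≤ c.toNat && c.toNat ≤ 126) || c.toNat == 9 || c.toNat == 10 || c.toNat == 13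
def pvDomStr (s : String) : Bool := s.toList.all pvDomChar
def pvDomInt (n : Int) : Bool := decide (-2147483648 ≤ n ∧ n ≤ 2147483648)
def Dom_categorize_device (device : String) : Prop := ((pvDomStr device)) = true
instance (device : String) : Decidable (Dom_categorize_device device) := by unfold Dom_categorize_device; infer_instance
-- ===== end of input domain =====

-- B replaces A's ordered startswith chain by exact-match hash lookups of the four
-- possible prefix lengths in one category table (idiomatic; same cost).

-- ===== PORT A =====
def categorize_device (device : String) : String :=
  if PySem.Str.startswith device "PTP" then "PTP"
  else if PySem.Str.startswith device "NET" then "Setor"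
  else if PySem.Str.startswith device "APM" then "Escolas"
  else if PySem.Str.startswith device "L2" then "Linktel"
  else if (["MONITOR", "SWITCH", "VM"].any fun pfx => PySem.Str.startswith device pfx) then "Estrutura"
  else if PySem.Str.startswith device "SKYNET" then "BB"
  else "Clientes PF"

-- ===== PORT B =====
def pvExact : PySem.Dict String String :=
  PySem.Dict.ofList
    [("MONITOR", "Estrutura"), ("SWITCH", "Estrutura"), ("SKYNET", "BB"),
     ("PTP", "PTP"), ("NET", "Setor"), ("APM", "Escolas"),
     ("L2", "Linktel"), ("VM", "Estrutura")]

-- Python's `x or y` on the results: every stored category is a non-empty string, so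
-- `.get(...) or …` is exactly Option.or, and the final `or "Clientes PF"` is getD.
def categorize_device_alt (device : String) : String :=
  (Option.or (PySem.Dict.get? pvExact (PySem.Str.slice device none (some 7)))
    (Option.or (PySem.Dict.get? pvExact (PySem.Str.slice device none (some 6)))
      (Option.or (PySem.Dict.get? pvExact (PySem.Str.slice device none (some 3)))
        (PySem.Dict.get? pvExact (PySem.Str.slice device none (some 2)))))).getD "Clientes PF"

-- ===== PRECONDITION & SPEC =====
def Spec_categorize_device (device : String) (out : String) : Prop := out = categorize_device_alt device
instance (device : String) (out : String) : Decidable (Spec_categorize_device device out) := by unfold Spec_categorize_device; infer_instance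

-- ===== CLAIM (what is proved, stated in full; the proofs are below) =====
def Claim_equal_categorize_device : Prop := ∀ (device : String), Dom_categorize_device device → Spec_categorize_device device (categorize_device device)

-- ===== LEMMAS AND PROOFS =====

lemma pv_nopref {p q L : List Char} (hp : p <+: L) (h1 : ¬ p <+: q) (h2 : ¬ q <+: p) :
    ¬ q <+: L := fun hq => (List.prefix_or_prefix_of_prefix hp hq).elim h1 h2

lemma pv_cond_iff (L k : List Char) (n : Nat) :
    (L.take n = k) ↔ (k.length ≤ n ∧ k <+: L ∧ (k.length = n ∨ L.length = k.length)) := by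
  constructor
  · intro h
    have hpfx : k <+: L := h ▸ List.take_prefix n L
    have hlen := congrArg List.length h
    simp [List.length_take] at hlen
    refine ⟨by omega, hpfx, ?_⟩
    omega
  · rintro ⟨h0, h1, h2⟩
    rcases h2 with h | h
    · subst h; exact (List.prefix_iff_eq_take.mp h1).symm
    · have : L = k := (List.IsPrefix.eq_of_length h1 h.symm).symm
      subst this
      exact List.take_of_length_le h0

lemma pv_slice_take (s : String) (n : Int) (hn : 0 ≤ n) :
    (PySem.Str.slice s none (some n)).toList = s.toList.take n.toNat := by
  simp [PySem.Str.toList_slice, PySem.List.slice_to _ hn]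

lemma pv_take7 (s : String) : (PySem.Str.slice s none (some 7)).toList = s.toList.take 7 :=
  pv_slice_take s 7 (by decide)
lemma pv_take6 (s : String) : (PySem.Str.slice s none (some 6)).toList = s.toList.take 6 :=
  pv_slice_take s 6 (by decide)
lemma pv_take3 (s : String) : (PySem.Str.slice s none (some 3)).toList = s.toList.take 3 :=
  pv_slice_take s 3 (by decide)
lemma pv_take2 (s : String) : (PySem.Str.slice s none (some 2)).toList = s.toList.take 2 :=
  pv_slice_take s 2 (by decide)

lemma pv_beq (k s : String) : (k == s) = decide (s.toList = k.toList) := by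
  rw [Bool.eq_iff_iff, beq_iff_eq, decide_eq_true_iff]
  exact ⟨fun h => by simp [h], fun h => (String.toList_inj.mp h).symm⟩

lemma pv_kM : "MONITOR".toList = ['M', 'O', 'N', 'I', 'T', 'O', 'R'] := rfl
lemma pv_kS : "SWITCH".toList = ['S', 'W', 'I', 'T', 'C', 'H'] := rfl
lemma pv_kK : "SKYNET".toList = ['S', 'K', 'Y', 'N', 'E', 'T'] := rfl
lemma pv_kP : "PTP".toList = ['P', 'T', 'P'] := rfl
lemma pv_kN : "NET".toList = ['N', 'E', 'T'] := rfl
lemma pv_kA : "APM".toList = ['A', 'P', 'M'] := rfl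
lemma pv_kL : "L2".toList = ['L', '2'] := rfl
lemma pv_kV : "VM".toList = ['V', 'M'] := rfl

lemma pv_get (s : String) : PySem.Dict.get? pvExact s =
    if s.toList = "MONITOR".toList then some "Estrutura"
    else if s.toList = "SWITCH".toList then some "Estrutura"
    else if s.toList = "SKYNET".toList then some "BB"
    else if s.toList = "PTP".toList then some "PTP"
    else if s.toList = "NET".toList then some "Setor"
    else if s.toList = "APM".toList then some "Escolas"
    else if s.toList = "L2".toList then some "Linktel"
    else if s.toList = "VM".toList then some "Estrutura"
    else none := by
  have h : pvExact = PySem.Dict.mk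
      [("MONITOR", "Estrutura"), ("SWITCH", "Estrutura"), ("SKYNET", "BB"),
       ("PTP", "PTP"), ("NET", "Setor"), ("APM", "Escolas"),
       ("L2", "Linktel"), ("VM", "Estrutura")] := by decide
  rw [h]
  simp only [PySem.Dict.get?_mk_cons, pv_beq]
  simp only [decide_eq_true_eq]
  rfl

set_option maxHeartbeats 4000000 in
lemma pv_main (device : String) : categorize_device device = categorize_device_alt device := by
  unfold categorize_device categorize_device_alt
  rw [pv_get, pv_get, pv_get, pv_get, pv_take7 device, pv_take6 device, pv_take3 device, pv_take2 device]
  simp only [pv_cond_iff, PySem.Str.startswith_eq, PySem.Chars.startswith_iff,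
    List.any_cons, List.any_nil, Bool.or_eq_true, pv_kM, pv_kS, pv_kK, pv_kP, pv_kN, pv_kA, pv_kL, pv_kV,
    List.length_cons, List.length_nil]
  by_cases hP : ['P', 'T', 'P'] <+: device.toList
  ·
    have nN : ¬ (['N', 'E', 'T'] <+: device.toList) := pv_nopref hP (by decide) (by decide)
    have nA : ¬ (['A', 'P', 'M'] <+: device.toList) := pv_nopref hP (by decide) (by decide)
    have nL : ¬ (['L', '2'] <+: device.toList) := pv_nopref hP (by decide) (by decide)
    have nM : ¬ (['M', 'O', 'N', 'I', 'T', 'O', 'R'] <+: device.toList) := pv_nopref hP (by decide) (by decide)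
    have nS : ¬ (['S', 'W', 'I', 'T', 'C', 'H'] <+: device.toList) := pv_nopref hP (by decide) (by decide)
    have nV : ¬ (['V', 'M'] <+: device.toList) := pv_nopref hP (by decide) (by decide)
    have nK : ¬ (['S', 'K', 'Y', 'N', 'E', 'T'] <+: device.toList) := pv_nopref hP (by decide) (by decide)
    simp [hP, nN, nA, nL, nM, nS, nV, nK]
    all_goals (split_ifs <;> rfl)
  by_cases hN : ['N', 'E', 'T'] <+: device.toList
  ·
    have nP : ¬ (['P', 'T', 'P'] <+: device.toList) := pv_nopref hN (by decide) (by decide)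
    have nA : ¬ (['A', 'P', 'M'] <+: device.toList) := pv_nopref hN (by decide) (by decide)
    have nL : ¬ (['L', '2'] <+: device.toList) := pv_nopref hN (by decide) (by decide)
    have nM : ¬ (['M', 'O', 'N', 'I', 'T', 'O', 'R'] <+: device.toList) := pv_nopref hN (by decide) (by decide)
    have nS : ¬ (['S', 'W', 'I', 'T', 'C', 'H'] <+: device.toList) := pv_nopref hN (by decide) (by decide)
    have nV : ¬ (['V', 'M'] <+: device.toList) := pv_nopref hN (by decide) (by decide)
    have nK : ¬ (['S', 'K', 'Y', 'N', 'E', 'T'] <+: device.toList) := pv_nopref hN (by decide) (by decide)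
    simp [hN, nP, nA, nL, nM, nS, nV, nK]
    all_goals (split_ifs <;> rfl)
  by_cases hA : ['A', 'P', 'M'] <+: device.toList
  ·
    have nP : ¬ (['P', 'T', 'P'] <+: device.toList) := pv_nopref hA (by decide) (by decide)
    have nN : ¬ (['N', 'E', 'T'] <+: device.toList) := pv_nopref hA (by decide) (by decide)
    have nL : ¬ (['L', '2'] <+: device.toList) := pv_nopref hA (by decide) (by decide)
    have nM : ¬ (['M', 'O', 'N', 'I', 'T', 'O', 'R'] <+: device.toList) := pv_nopref hA (by decide) (by decide)
    have nS : ¬ (['S', 'W', 'I', 'T', 'C', 'H'] <+: device.toList) := pv_nopref hA (by decide) (by decide)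
    have nV : ¬ (['V', 'M'] <+: device.toList) := pv_nopref hA (by decide) (by decide)
    have nK : ¬ (['S', 'K', 'Y', 'N', 'E', 'T'] <+: device.toList) := pv_nopref hA (by decide) (by decide)
    simp [hA, nP, nN, nL, nM, nS, nV, nK]
    all_goals (split_ifs <;> rfl)
  by_cases hL : ['L', '2'] <+: device.toList
  ·
    have nP : ¬ (['P', 'T', 'P'] <+: device.toList) := pv_nopref hL (by decide) (by decide)
    have nN : ¬ (['N', 'E', 'T'] <+: device.toList) := pv_nopref hL (by decide) (by decide)
    have nA : ¬ (['A', 'P', 'M'] <+: device.toList) := pv_nopref hL (by decide) (by decide)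
    have nM : ¬ (['M', 'O', 'N', 'I', 'T', 'O', 'R'] <+: device.toList) := pv_nopref hL (by decide) (by decide)
    have nS : ¬ (['S', 'W', 'I', 'T', 'C', 'H'] <+: device.toList) := pv_nopref hL (by decide) (by decide)
    have nV : ¬ (['V', 'M'] <+: device.toList) := pv_nopref hL (by decide) (by decide)
    have nK : ¬ (['S', 'K', 'Y', 'N', 'E', 'T'] <+: device.toList) := pv_nopref hL (by decide) (by decide)
    simp [hL, nP, nN, nA, nM, nS, nV, nK]
    all_goals (split_ifs <;> rfl)
  by_cases hM : ['M', 'O', 'N', 'I', 'T', 'O', 'R'] <+: device.toList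
  ·
    have nP : ¬ (['P', 'T', 'P'] <+: device.toList) := pv_nopref hM (by decide) (by decide)
    have nN : ¬ (['N', 'E', 'T'] <+: device.toList) := pv_nopref hM (by decide) (by decide)
    have nA : ¬ (['A', 'P', 'M'] <+: device.toList) := pv_nopref hM (by decide) (by decide)
    have nL : ¬ (['L', '2'] <+: device.toList) := pv_nopref hM (by decide) (by decide)
    have nS : ¬ (['S', 'W', 'I', 'T', 'C', 'H'] <+: device.toList) := pv_nopref hM (by decide) (by decide)
    have nV : ¬ (['V', 'M'] <+: device.toList) := pv_nopref hM (by decide) (by decide)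
    have nK : ¬ (['S', 'K', 'Y', 'N', 'E', 'T'] <+: device.toList) := pv_nopref hM (by decide) (by decide)
    simp [hM, nP, nN, nA, nL, nS, nV, nK]
  by_cases hS : ['S', 'W', 'I', 'T', 'C', 'H'] <+: device.toList
  ·
    have nP : ¬ (['P', 'T', 'P'] <+: device.toList) := pv_nopref hS (by decide) (by decide)
    have nN : ¬ (['N', 'E', 'T'] <+: device.toList) := pv_nopref hS (by decide) (by decide)
    have nA : ¬ (['A', 'P', 'M'] <+: device.toList) := pv_nopref hS (by decide) (by decide)
    have nL : ¬ (['L', '2'] <+: device.toList) := pv_nopref hS (by decide) (by decide)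
    have nM : ¬ (['M', 'O', 'N', 'I', 'T', 'O', 'R'] <+: device.toList) := pv_nopref hS (by decide) (by decide)
    have nV : ¬ (['V', 'M'] <+: device.toList) := pv_nopref hS (by decide) (by decide)
    have nK : ¬ (['S', 'K', 'Y', 'N', 'E', 'T'] <+: device.toList) := pv_nopref hS (by decide) (by decide)
    simp [hS, nP, nN, nA, nL, nM, nV, nK]
    all_goals (split_ifs <;> rfl)
  by_cases hV : ['V', 'M'] <+: device.toList
  ·
    have nP : ¬ (['P', 'T', 'P'] <+: device.toList) := pv_nopref hV (by decide) (by decide)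
    have nN : ¬ (['N', 'E', 'T'] <+: device.toList) := pv_nopref hV (by decide) (by decide)
    have nA : ¬ (['A', 'P', 'M'] <+: device.toList) := pv_nopref hV (by decide) (by decide)
    have nL : ¬ (['L', '2'] <+: device.toList) := pv_nopref hV (by decide) (by decide)
    have nM : ¬ (['M', 'O', 'N', 'I', 'T', 'O', 'R'] <+: device.toList) := pv_nopref hV (by decide) (by decide)
    have nS : ¬ (['S', 'W', 'I', 'T', 'C', 'H'] <+: device.toList) := pv_nopref hV (by decide) (by decide)
    have nK : ¬ (['S', 'K', 'Y', 'N', 'E', 'T'] <+: device.toList) := pv_nopref hV (by decide) (by decide)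
    simp [hV, nP, nN, nA, nL, nM, nS, nK]
    all_goals (split_ifs <;> rfl)
  by_cases hK : ['S', 'K', 'Y', 'N', 'E', 'T'] <+: device.toList
  ·
    have nP : ¬ (['P', 'T', 'P'] <+: device.toList) := pv_nopref hK (by decide) (by decide)
    have nN : ¬ (['N', 'E', 'T'] <+: device.toList) := pv_nopref hK (by decide) (by decide)
    have nA : ¬ (['A', 'P', 'M'] <+: device.toList) := pv_nopref hK (by decide) (by decide)
    have nL : ¬ (['L', '2'] <+: device.toList) := pv_nopref hK (by decide) (by decide)
    have nM : ¬ (['M', 'O', 'N', 'I', 'T', 'O', 'R'] <+: device.toList) := pv_nopref hK (by decide) (by decide)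
    have nS : ¬ (['S', 'W', 'I', 'T', 'C', 'H'] <+: device.toList) := pv_nopref hK (by decide) (by decide)
    have nV : ¬ (['V', 'M'] <+: device.toList) := pv_nopref hK (by decide) (by decide)
    simp [hK, nP, nN, nA, nL, nM, nS, nV]
    all_goals (split_ifs <;> rfl)
  · simp [hP, hN, hA, hL, hM, hS, hV, hK]

-- ===== VERDICT (by name: the statement is the Claim_ definition above) =====
theorem categorize_device_spec : Claim_equal_categorize_device := by
  intro device _
  unfold Spec_categorize_device
  exact pv_main device
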